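-- pv_equiv track=rewrite | github.com/nservant/HiC-Pro | bin/utils/digest_genome.py | replaceN
-- ===== SOURCE A (Python) =====
-- def replaceN(cs):
--     npos = int(cs.find('N'))
--     cseql = []
--     if npos != -1:
--         for nuc in ["A","C","G","T"]:
--             tmp = cs.replace('N', nuc, 1)
--             tmpl = replaceN(tmp)
--             if type(tmpl) == list:
--                 cseql = cseql + tmpl
--             else:
--                 cseql.append(tmpl)
--     else:
--         cseql.append(cs)
--     return cseql
-- ===== SOURCE B (Python) =====
-- def replaceN(cs):
--     positions = [i for i, c in enumerate(cs) if c == 'N']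
--     out = []
--     for combo in _combos(len(positions)):
--         chars = list(cs)
--         for pos, nuc in zip(positions, combo):
--             chars[pos] = nuc
--         out.append("".join(chars))
--     return out
--
--
-- def _combos(k):
--     if k == 0:
--         return [[]]
--     return [[nuc] + rest for nuc in "ACGT" for rest in _combos(k - 1)]
-- ===== Notes on version B (the rewrite author's own statement) =====
-- stated objective: alternative
-- what changed: Replaces A's recursive find-first-N/replace/re-scan over whole strings by a single pass collecting the N positions and an explicit enumeration of all A/C/G/T combinations substituted into those positions.
import Mathlib
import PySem

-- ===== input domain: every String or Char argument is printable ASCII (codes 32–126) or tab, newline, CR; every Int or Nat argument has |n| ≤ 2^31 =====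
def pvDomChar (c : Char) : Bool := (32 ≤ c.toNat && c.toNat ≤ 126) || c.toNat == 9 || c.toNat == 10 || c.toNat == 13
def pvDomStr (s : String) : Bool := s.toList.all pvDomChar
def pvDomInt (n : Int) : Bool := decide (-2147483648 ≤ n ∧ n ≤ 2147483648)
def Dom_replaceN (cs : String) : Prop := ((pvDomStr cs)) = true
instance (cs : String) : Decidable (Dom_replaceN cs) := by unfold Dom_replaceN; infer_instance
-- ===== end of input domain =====

-- B replaces A's find/replace-first recursion by collecting the N positions once
-- and substituting every A/C/G/T combination (alternative decomposition, same cost).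

-- ===== PORT A =====
def pyReplace1N (nuc : Char) : List Char → List Char
  | [] => []
  | c :: t => if c = 'N' then nuc :: t else c :: pyReplace1N nuc t

theorem count_pyReplace1N_lt {nuc : Char} (hn : nuc ≠ 'N') :
    ∀ l : List Char, 'N' ∈ l → (pyReplace1N nuc l).count 'N' < l.count 'N' := by
  intro l hl
  induction l with
  | nil => cases hl
  | cons c t ih =>
    by_cases hc : c = 'N'
    · subst hc; simp [pyReplace1N, hn]
    · rcases List.mem_cons.mp hl with h | h
      · exact absurd h.symm hc
      · have := ih h
        simp only [pyReplace1N, if_neg hc, List.count_cons]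
        split_ifs <;> omega

theorem mem_of_find_ne (l : List Char) (h : PySem.Chars.find l ['N'] ≠ -1) : 'N' ∈ l := by
  have := (PySem.Chars.find_ne_neg_one_iff (s := l) (sub := ['N'])).mp h
  exact (List.singleton_infix_iff _ _).mp this

def replACore (l : List Char) : List (List Char) :=
  if h : PySem.Chars.find l ['N'] ≠ -1 then
    replACore (pyReplace1N 'A' l) ++ replACore (pyReplace1N 'C' l) ++
      replACore (pyReplace1N 'G' l) ++ replACore (pyReplace1N 'T' l)
  else
    [l]
termination_by l.count 'N'
decreasing_by
  all_goals exact count_pyReplace1N_lt (by decide) l (mem_of_find_ne l h)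

def replaceN (cs : String) : List String :=
  (replACore cs.toList).map (fun l => String.ofList l)

-- ===== PORT B =====
-- _combos(k): all length-k lists over "ACGT", first coordinate varying slowest
def pyCombos : Nat → List (List Char)
  | 0 => [[]]
  | k + 1 => ("ACGT".toList).flatMap (fun nuc => (pyCombos k).map (fun rest => nuc :: rest))

def replaceN_alt (cs : String) : List String :=
  let positions := ((PySem.List.enumerate cs.toList).filter (fun p => p.2 == 'N')).map (·.1)
  (pyCombos positions.length).map (fun combo =>
    -- chars[pos] = nuc; positions come from enumerate(cs) so pos ≥ 0 and .toNat is exact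
    String.ofList ((positions.zip combo).foldl (fun chars pn => chars.set pn.1.toNat pn.2) cs.toList))

-- ===== PRECONDITION & SPEC =====
def Spec_replaceN (cs : String) (out : List String) : Prop := out = replaceN_alt cs
instance (cs : String) (out : List String) : Decidable (Spec_replaceN cs out) := by unfold Spec_replaceN; infer_instance

-- ===== CLAIM (what is proved, stated in full; the proofs are below) =====
def Claim_equal_replaceN : Prop := ∀ (cs : String), Dom_replaceN cs → Spec_replaceN cs (replaceN cs)

-- ===== LEMMAS AND PROOFS =====

-- the common specification both ports are reduced to: structural expansion of the N wildcards
def expand : List Char → List (List Char)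
  | [] => [[]]
  | c :: t =>
    if c = 'N' then
      ['A', 'C', 'G', 'T'].flatMap (fun n => (expand t).map (n :: ·))
    else
      (expand t).map (c :: ·)

theorem split_first_N : ∀ l : List Char, 'N' ∈ l →
    ∃ pre suf, 'N' ∉ pre ∧ l = pre ++ 'N' :: suf := by
  intro l hl
  induction l with
  | nil => cases hl
  | cons c t ih =>
    by_cases hc : c = 'N'
    · exact ⟨[], t, by simp, by simp [hc]⟩
    · rcases List.mem_cons.mp hl with h | h
      · exact absurd h.symm hc
      · obtain ⟨pre, suf, hp, he⟩ := ih h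
        exact ⟨c :: pre, suf, by simp [hp, Ne.symm hc], by simp [he]⟩

theorem pyReplace1N_split (nuc : Char) : ∀ (pre suf : List Char), 'N' ∉ pre →
    pyReplace1N nuc (pre ++ 'N' :: suf) = pre ++ nuc :: suf := by
  intro pre suf hp
  induction pre with
  | nil => simp [pyReplace1N]
  | cons c p ih =>
    have hc : c ≠ 'N' := fun h => hp (by simp [h])
    simp only [List.cons_append, pyReplace1N, if_neg hc]
    rw [ih (fun h => hp (by simp [h]))]

theorem expand_noN : ∀ l : List Char, 'N' ∉ l → expand l = [l] := by
  intro l hl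
  induction l with
  | nil => rfl
  | cons c t ih =>
    have hc : c ≠ 'N' := fun h => hl (by simp [h])
    simp [expand, hc, ih (fun h => hl (by simp [h]))]

theorem expand_split : ∀ (pre suf : List Char), 'N' ∉ pre →
    expand (pre ++ 'N' :: suf) = ['A', 'C', 'G', 'T'].flatMap (fun n => expand (pre ++ n :: suf)) := by
  intro pre suf hp
  induction pre with
  | nil => simp [expand]
  | cons c p ih =>
    have hc : c ≠ 'N' := fun h => hp (by simp [h])
    simp only [List.cons_append, expand, if_neg hc, ih (fun h => hp (by simp [h])),
      List.map_flatMap]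

theorem replACore_eq_expand : ∀ l : List Char, replACore l = expand l := by
  suffices H : ∀ k, ∀ l : List Char, l.count 'N' = k → replACore l = expand l by
    intro l; exact H _ l rfl
  intro k
  induction k using Nat.strong_induction_on with
  | _ k ih =>
    intro l hk
    by_cases h : 'N' ∈ l
    · obtain ⟨pre, suf, hp, rfl⟩ := split_first_N l h
      have hfind : PySem.Chars.find (pre ++ 'N' :: suf) ['N'] ≠ -1 :=
        (PySem.Chars.find_ne_neg_one_iff _ _).mpr ((List.singleton_infix_iff _ _).mpr h)
      have hcp : pre.count 'N' = 0 := List.count_eq_zero.mpr hp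
      have hks : suf.count 'N' + 1 = k := by
        simp [List.count_append, hcp] at hk; omega
      have hrec : ∀ nuc : Char, nuc ≠ 'N' →
          replACore (pyReplace1N nuc (pre ++ 'N' :: suf)) = expand (pre ++ nuc :: suf) := by
        intro nuc hn
        rw [pyReplace1N_split nuc pre suf hp]
        exact ih (suf.count 'N') (by omega) _ (by simp [List.count_append, hcp, hn])
      rw [replACore, dif_pos hfind, hrec 'A' (by decide), hrec 'C' (by decide),
        hrec 'G' (by decide), hrec 'T' (by decide), expand_split pre suf hp]
      simp [List.flatMap]
    · rw [replACore, dif_neg, expand_noN l h]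
      simp only [ne_eq, not_not]
      exact (PySem.Chars.find_eq_neg_one_iff _ _).mpr (fun hi => h ((List.singleton_infix_iff _ _).mp hi))

-- the N positions of l, indices starting at s
def nPos (l : List Char) (s : Int) : List Int :=
  ((PySem.List.enumerate l s).filter (fun p => p.2 == 'N')).map (·.1)

theorem nPos_nil (s : Int) : nPos [] s = [] := by
  simp [nPos, PySem.List.enumerate]

theorem nPos_cons (c : Char) (t : List Char) (s : Int) :
    nPos (c :: t) s = (if c = 'N' then [s] else []) ++ nPos t (s + 1) := by
  by_cases hc : c = 'N' <;>
    simp [nPos, PySem.List.enumerate_cons, hc]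

theorem nPos_shift : ∀ (l : List Char) (s : Int), nPos l (s + 1) = (nPos l s).map (· + 1) := by
  intro l
  induction l with
  | nil => intro s; simp [nPos_nil]
  | cons c t ih =>
    intro s
    rw [nPos_cons, nPos_cons, ih (s + 1), List.map_append]
    by_cases hc : c = 'N' <;> simp [hc]

theorem nPos_nonneg : ∀ (l : List Char), ∀ p ∈ nPos l 0, 0 ≤ p := by
  intro l
  induction l with
  | nil => simp [nPos_nil]
  | cons c t ih =>
    intro p hp
    rw [nPos_cons, nPos_shift] at hp
    rcases List.mem_append.mp hp with h | h
    · split_ifs at h <;> simp_all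
    · obtain ⟨q, hq, rfl⟩ := List.mem_map.mp h
      have := ih q hq; omega

theorem foldl_set_shift :
    ∀ (ps : List Int) (combo : List Char) (x : Char) (t : List Char), (∀ p ∈ ps, 0 ≤ p) →
      (((ps.map (· + 1)).zip combo).foldl (fun chars pn => chars.set pn.1.toNat pn.2) (x :: t)) =
        x :: ((ps.zip combo).foldl (fun chars pn => chars.set pn.1.toNat pn.2) t) := by
  intro ps
  induction ps with
  | nil => intro combo x t _; simp
  | cons p ps ih =>
    intro combo x t hnn
    cases combo with
    | nil => simp
    | cons n combo =>
      have hp : 0 ≤ p := hnn p (by simp)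
      have h1 : (p + 1).toNat = p.toNat + 1 := by omega
      simp only [List.map_cons, List.zip_cons_cons, List.foldl_cons, h1, List.set_cons_succ]
      exact ih combo x (t.set p.toNat n) (fun q hq => hnn q (by simp [hq]))

theorem alt_core_eq_expand : ∀ l : List Char,
    (pyCombos (nPos l 0).length).map
      (fun combo => (((nPos l 0).zip combo).foldl
        (fun chars pn => chars.set pn.1.toNat pn.2) l)) = expand l := by
  intro l
  induction l with
  | nil => simp [nPos_nil, pyCombos, expand]
  | cons c t ih =>
    by_cases hc : c = 'N'
    · rw [nPos_cons, if_pos hc, nPos_shift, List.singleton_append, List.length_cons,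
        List.length_map, pyCombos, List.map_flatMap]
      have hACGT : "ACGT".toList = ['A', 'C', 'G', 'T'] := by decide
      have hstep : ∀ nuc : Char,
          (List.map ((fun combo =>
              (((((0 : Int) :: (nPos t 0).map (· + 1))).zip combo).foldl
                (fun chars pn => chars.set pn.1.toNat pn.2) (c :: t)))
            ∘ (fun rest => nuc :: rest)) (pyCombos (nPos t 0).length)) =
          (expand t).map (nuc :: ·) := by
        intro nuc
        have h1 : ∀ combo : List Char,
            ((((0 : Int) :: (nPos t 0).map (· + 1)).zip (nuc :: combo)).foldl
              (fun chars pn => chars.set pn.1.toNat pn.2) (c :: t)) =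
            nuc :: (((nPos t 0).zip combo).foldl
              (fun chars pn => chars.set pn.1.toNat pn.2) t) := by
          intro combo
          simp only [List.zip_cons_cons, List.foldl_cons, Int.toNat_zero, List.set_cons_zero]
          exact foldl_set_shift (nPos t 0) combo nuc t (nPos_nonneg t)
        calc (List.map _ (pyCombos (nPos t 0).length))
            = (pyCombos (nPos t 0).length).map ((nuc :: ·) ∘ (fun combo =>
                (((nPos t 0).zip combo).foldl
                  (fun chars pn => chars.set pn.1.toNat pn.2) t))) := by
              exact List.map_congr_left (fun combo _ => h1 combo)
          _ = (expand t).map (nuc :: ·) := by rw [← List.map_map, ih]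
      rw [hACGT]
      have : (fun nuc => List.map ((fun combo =>
              ((((0 : Int) :: (nPos t 0).map (· + 1)).zip combo).foldl
                (fun chars pn => chars.set pn.1.toNat pn.2) (c :: t)))
            ∘ (fun rest => nuc :: rest)) (pyCombos (nPos t 0).length)) =
          (fun nuc => (expand t).map (nuc :: ·)) := funext fun nuc => hstep nuc
      simp only [List.map_map]
      rw [this, expand, if_pos hc]
    · rw [nPos_cons]
      simp only [if_neg hc, List.nil_append, nPos_shift, List.length_map]
      have hstep : ∀ combo : List Char,
          ((((nPos t 0).map (· + 1)).zip combo).foldl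
            (fun chars pn => chars.set pn.1.toNat pn.2) (c :: t)) =
          c :: (((nPos t 0).zip combo).foldl (fun chars pn => chars.set pn.1.toNat pn.2) t) := by
        intro combo; exact foldl_set_shift (nPos t 0) combo c t (nPos_nonneg t)
      calc (pyCombos (nPos t 0).length).map _
          = (pyCombos (nPos t 0).length).map ((c :: ·) ∘ (fun combo =>
              (((nPos t 0).zip combo).foldl (fun chars pn => chars.set pn.1.toNat pn.2) t))) := by
            exact List.map_congr_left (fun combo _ => hstep combo)
        _ = expand (c :: t) := by
            rw [← List.map_map, ih, expand]
            simp [hc]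

-- ===== VERDICT (by name: the statement is the Claim_ definition above) =====
theorem replaceN_spec : Claim_equal_replaceN := by
  intro cs _
  unfold Spec_replaceN replaceN replaceN_alt
  rw [replACore_eq_expand]
  show _ = (pyCombos (nPos cs.toList 0).length).map _
  rw [← alt_core_eq_expand cs.toList, List.map_map]
  rfl
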